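-- pv_equiv track=rewrite | github.com/theiv767/Query-Processor | scripts/utils.py | get_query_vector
-- ===== SOURCE A (Python) =====
-- def get_query_vector(query):
--     separators =   ["=", ">=", "<=", "<>", ",", "(", ")"]
--
--
--     query = query.strip()
--     words = query.upper().split()
--
--     query_vector = []
--     for word in words:
--
--         word = word.strip()
--
--         splited_words = [""]
--
--         if not word in separators:
--             for idx, letter in enumerate(word):
--                 if letter in separators:
--                     if splited_words[-1] == "":
--                         splited_words[-1] = letter
--                     else:
--                         splited_words.append(letter)
--
--                     if len(word)-1 > idx:
--                         splited_words.append("")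
--
--
--                 else:
--                     splited_words[-1] += letter
--
--
--         else:
--             splited_words = [word]
--
--         for i in splited_words:
--             query_vector.append(i)
--
--     return query_vector
-- ===== SOURCE B (Python) =====
-- def get_query_vector(query):
--     separators = ("=", ">=", "<=", "<>", ",", "(", ")")
--
--     query_vector = []
--     for token in query.strip().upper().split():
--         if token in separators:
--             query_vector.append(token)
--         else:
--             # surround each single-char separator with spaces, then re-split
--             spaced = "".join(" " + c + " " if c in "=,()" else c for c in token)
--             query_vector.extend(spaced.split())
--     return query_vector
-- ===== Notes on version B (the rewrite author's own statement) =====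
-- stated objective: simpler
-- what changed: Replaces A's per-character state machine over a growing splited_words list (last-element string mutation, '' sentinel, len-1>idx lookahead) with a pad-and-resplit pass: each single-char separator is surrounded by spaces and the token is re-split with str.split().
import Mathlib
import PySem

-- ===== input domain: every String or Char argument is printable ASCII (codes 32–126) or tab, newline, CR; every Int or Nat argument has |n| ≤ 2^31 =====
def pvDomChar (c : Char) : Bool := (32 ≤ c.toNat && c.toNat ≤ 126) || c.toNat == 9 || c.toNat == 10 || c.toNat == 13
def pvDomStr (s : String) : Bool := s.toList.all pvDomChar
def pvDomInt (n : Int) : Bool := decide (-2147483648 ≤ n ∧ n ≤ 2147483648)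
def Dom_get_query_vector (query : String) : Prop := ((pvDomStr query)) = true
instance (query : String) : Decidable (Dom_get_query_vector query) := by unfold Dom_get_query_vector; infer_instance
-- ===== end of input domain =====

-- B replaces A's per-character state machine (mutating the last element of splited_words, with
-- '' sentinel and len(word)-1>idx lookahead) by padding each single-char separator with spaces
-- and re-splitting the token; objective: simpler. Strings are handled as char lists per the
-- PySem convention (PySem.Chars.*), converted to String at the end.

-- ===== PORT A =====
-- separators = ["=", ">=", "<=", "<>", ",", "(", ")"]  (as char lists)
def pvSeps : List (List Char) := [['='], ['>', '='], ['<', '='], ['<', '>'], [','], ['('], [')']]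

-- splited_words[-1]  (the state list is always nonempty, so the default is never used)
def pvLast (sw : List (List Char)) : List Char := (sw.getLast?).getD []

-- splited_words[-1] = v
def pvSetLast (sw : List (List Char)) (v : List Char) : List (List Char) := sw.dropLast ++ [v]

-- the inner 'for idx, letter in enumerate(word)' loop over the state splited_words;
-- 'len(word)-1 > idx' ⟺ the remaining character list after the current letter is nonempty
def pvLoopA : List (List Char) → List Char → List (List Char)
  | sw, [] => sw
  | sw, c :: rest =>
    if pvSeps.contains [c] then
      let sw1 := if pvLast sw = [] then pvSetLast sw [c] else sw ++ [[c]]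
      let sw2 := if rest.isEmpty then sw1 else sw1 ++ [[]]
      pvLoopA sw2 rest
    else
      pvLoopA (pvSetLast sw (pvLast sw ++ [c])) rest

def get_query_vector (query : String) : List String :=
  let query := PySem.Chars.strip query.toList
  let words := PySem.Chars.split₀ (PySem.Chars.upper query)
  (words.foldl (fun query_vector word =>
      let word := PySem.Chars.strip word
      let splited_words :=
        if pvSeps.contains word = false then pvLoopA [[]] word else [word]
      query_vector ++ splited_words) []).map String.ofList

-- ===== PORT B =====
-- '" " + c + " " if c in "=,()" else c'  (B's separators tuple is the same list pvSeps)
def pvExpand (c : Char) : List Char :=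
  if (['=', ',', '(', ')'] : List Char).contains c then [' ', c, ' '] else [c]

def get_query_vector_alt (query : String) : List String :=
  let tokens := PySem.Chars.split₀ (PySem.Chars.upper (PySem.Chars.strip query.toList))
  (tokens.foldl (fun query_vector token =>
      if pvSeps.contains token then query_vector ++ [token]
      else query_vector ++ PySem.Chars.split₀ (token.flatMap pvExpand)) []).map String.ofList

-- ===== PRECONDITION & SPEC =====
def Spec_get_query_vector (query : String) (out : List String) : Prop := out = get_query_vector_alt query
instance (query : String) (out : List String) : Decidable (Spec_get_query_vector query out) := by unfold Spec_get_query_vector; infer_instance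

-- ===== CLAIM (what is proved, stated in full; the proofs are below) =====
def Claim_equal_get_query_vector : Prop := ∀ (query : String), Dom_get_query_vector query → Spec_get_query_vector query (get_query_vector query)

-- ===== LEMMAS AND PROOFS =====

-- common specification of the inner split: maximal runs of non-separator characters,
-- single separator characters as their own groups; g is the run accumulated so far
def pvGroups : List Char → List Char → List (List Char)
  | g, [] => [g]
  | g, c :: rest =>
    if (['=', ',', '(', ')'] : List Char).contains c then
      (if g.isEmpty then [] else [g]) ++
        (if rest.isEmpty then [[c]] else [c] :: pvGroups [] rest)
    else pvGroups (g ++ [c]) rest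

-- pvGroups with the top-level empty/empty corner removed (what split₀.go produces)
def pvGroups' (g : List Char) (w : List Char) : List (List Char) :=
  if w.isEmpty && g.isEmpty then [] else pvGroups g w

theorem pvSeps_contains_singleton (c : Char) :
    pvSeps.contains [c] = (['=', ',', '(', ')'] : List Char).contains c := by
  simp [pvSeps, List.contains_eq_mem]

theorem pvSep_not_space (c : Char) (h : (['=', ',', '(', ')'] : List Char).contains c = true) :
    PySem.Chars.isspace c = false := by
  simp [List.contains_eq_mem] at h
  rcases h with h|h|h|h <;> subst h <;> decide

theorem strip_no_space (w : List Char) (hw : ∀ c ∈ w, PySem.Chars.isspace c = false) :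
    PySem.Chars.strip w = w := by
  have hl : List.dropWhile PySem.Chars.isspace w = w := by
    rw [List.dropWhile_eq_self_iff]; intro h; simp only [Bool.not_eq_true]
    exact hw _ (List.getElem_mem h)
  have hr : List.dropWhile PySem.Chars.isspace w.reverse = w.reverse := by
    rw [List.dropWhile_eq_self_iff]; intro h; simp only [Bool.not_eq_true]
    exact hw _ (by have := List.getElem_mem h; rwa [List.mem_reverse] at this)
  unfold PySem.Chars.strip PySem.Chars.lstrip PySem.Chars.rstrip
  rw [hl, hr, List.reverse_reverse]

theorem pvLast_concat (ss : List (List Char)) (g : List Char) : pvLast (ss ++ [g]) = g := by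
  simp [pvLast]

theorem pvSetLast_concat (ss : List (List Char)) (g v : List Char) :
    pvSetLast (ss ++ [g]) v = ss ++ [v] := by
  simp [pvSetLast]

theorem pvLoopA_eq_groups (cs : List Char) : ∀ (ss : List (List Char)) (g : List Char),
    pvLoopA (ss ++ [g]) cs = ss ++ pvGroups g cs := by
  induction cs with
  | nil => intro ss g; simp [pvLoopA, pvGroups]
  | cons c rest ih =>
    intro ss g
    rw [pvLoopA, pvGroups, pvSeps_contains_singleton]
    by_cases hc : (['=', ',', '(', ')'] : List Char).contains c = true
    · by_cases hg : g = []
      · subst hg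
        by_cases hr : rest = []
        · subst hr; simp [pvLast_concat, pvSetLast_concat, pvLoopA, pvGroups]
        · simp only [hc, if_true, pvLast_concat, pvSetLast_concat,
            List.isEmpty_iff, if_neg hr]
          have := ih (ss ++ [[c]]) []
          simpa using this
      · by_cases hr : rest = []
        · subst hr
          simp only [pvLast_concat, pvSetLast_concat, hc, if_true, List.isEmpty_iff,
            if_neg hg, List.isEmpty_nil, pvLoopA]
          simp
        · simp only [hc, if_true, pvLast_concat, pvSetLast_concat, List.isEmpty_iff,
            if_neg hg, if_neg hr]
          have := ih (ss ++ [g] ++ [[c]]) []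
          simpa using this
    · simp only [hc, if_false, pvLast_concat, pvSetLast_concat, Bool.false_eq_true]
      exact ih ss (g ++ [c])

theorem split₀_go_expand (w : List Char) (hw : ∀ c ∈ w, PySem.Chars.isspace c = false) :
    ∀ (cur : List Char) (acc : List (List Char)),
    PySem.Chars.split₀.go (w.flatMap pvExpand) cur acc = acc.reverse ++ pvGroups' cur.reverse w := by
  induction w with
  | nil =>
    intro cur acc
    rw [List.flatMap_nil, PySem.Chars.split₀.go, pvGroups']
    by_cases hcur : cur = []
    · subst hcur; simp
    · simp [hcur, pvGroups]
  | cons c rest ih =>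
    intro cur acc
    have hrest : ∀ x ∈ rest, PySem.Chars.isspace x = false := fun x hx => hw x (List.mem_cons_of_mem _ hx)
    rw [List.flatMap_cons, pvExpand]
    by_cases hc : (['=', ',', '(', ')'] : List Char).contains c = true
    · rw [if_pos hc]
      have hcs : PySem.Chars.isspace c = false := pvSep_not_space c hc
      have hc' : c = '=' ∨ c = ',' ∨ c = '(' ∨ c = ')' := by
        simpa [List.contains_eq_mem] using hc
      show PySem.Chars.split₀.go (' ' :: c :: ' ' :: rest.flatMap pvExpand) cur acc = _
      rw [PySem.Chars.split₀.go]
      by_cases hcur : cur = []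
      · subst hcur
        simp only [show PySem.Chars.isspace ' ' = true from by decide, if_true, List.isEmpty_nil]
        rw [PySem.Chars.split₀.go, if_neg (by simp [hcs]), PySem.Chars.split₀.go,
          if_pos (by decide), if_neg (by simp), ih hrest]
        simp only [List.reverse_cons, List.reverse_nil, List.nil_append, List.append_assoc]
        rw [pvGroups', pvGroups']
        by_cases hr : rest = []
        · subst hr; rcases hc' with h|h|h|h <;> subst h <;> simp [pvGroups]
        · rcases hc' with h|h|h|h <;> subst h <;> simp [hr, pvGroups]
      · simp only [show PySem.Chars.isspace ' ' = true from by decide, if_true,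
          List.isEmpty_iff, if_neg hcur]
        rw [PySem.Chars.split₀.go, if_neg (by simp [hcs]), PySem.Chars.split₀.go,
          if_pos (by decide), if_neg (by simp), ih hrest]
        simp only [List.reverse_cons, List.reverse_nil, List.nil_append, List.append_assoc]
        rw [pvGroups', pvGroups']
        by_cases hr : rest = []
        · subst hr; rcases hc' with h|h|h|h <;> subst h <;> simp [pvGroups, hcur]
        · rcases hc' with h|h|h|h <;> subst h <;> simp [hr, pvGroups, hcur]
    · have hc0 : ¬(c = '=' ∨ c = ',' ∨ c = '(' ∨ c = ')') := by
        simpa [List.contains_eq_mem] using hc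
      rw [if_neg hc]
      show PySem.Chars.split₀.go (c :: rest.flatMap pvExpand) cur acc = _
      rw [PySem.Chars.split₀.go, if_neg (by simp [hw c (List.mem_cons_self)]), ih hrest]
      rw [pvGroups', pvGroups']
      by_cases hr : rest = []
      · subst hr; simp [pvGroups, hc0]
      · simp [pvGroups, hc0, hr]

theorem split₀_go_mem (s : List Char) : ∀ (cur : List Char) (acc : List (List Char)),
    (∀ c ∈ cur, PySem.Chars.isspace c = false) →
    (∀ a ∈ acc, a ≠ [] ∧ ∀ c ∈ a, PySem.Chars.isspace c = false) →
    ∀ w ∈ PySem.Chars.split₀.go s cur acc, w ≠ [] ∧ ∀ c ∈ w, PySem.Chars.isspace c = false := by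
  induction s with
  | nil =>
    intro cur acc hcur hacc w hwmem
    rw [PySem.Chars.split₀.go] at hwmem
    by_cases hc : cur = []
    · simp [hc] at hwmem
      exact hacc w (by simpa using hwmem)
    · rw [if_neg (by simpa [List.isEmpty_iff] using hc)] at hwmem
      simp only [List.reverse_cons, List.mem_append, List.mem_reverse, List.mem_singleton] at hwmem
      rcases hwmem with h | h
      · exact hacc w h
      · subst h
        exact ⟨by simpa using hc, fun c hcmem => hcur c (by simpa using hcmem)⟩
  | cons c rest ih =>
    intro cur acc hcur hacc w hwmem
    rw [PySem.Chars.split₀.go] at hwmem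
    by_cases hsp : PySem.Chars.isspace c = true
    · rw [if_pos hsp] at hwmem
      by_cases hc : cur = []
      · rw [if_pos (by simpa [List.isEmpty_iff] using hc)] at hwmem
        exact ih [] acc (by simp) hacc w hwmem
      · rw [if_neg (by simpa [List.isEmpty_iff] using hc)] at hwmem
        refine ih [] _ (by simp) ?_ w hwmem
        intro a ha
        rcases List.mem_cons.1 ha with h | h
        · subst h
          exact ⟨by simpa using hc, fun x hx => hcur x (by simpa using hx)⟩
        · exact hacc a h
    · rw [if_neg hsp] at hwmem
      refine ih (c :: cur) acc ?_ hacc w hwmem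
      intro x hx
      rcases List.mem_cons.1 hx with h | h
      · subst h; simpa using hsp
      · exact hcur x h

theorem split₀_mem (s : List Char) (w : List Char) (hw : w ∈ PySem.Chars.split₀ s) :
    w ≠ [] ∧ ∀ c ∈ w, PySem.Chars.isspace c = false :=
  split₀_go_mem s [] [] (by simp) (by simp) w hw

theorem inner_eq (w : List Char) (hne : w ≠ []) (hw : ∀ c ∈ w, PySem.Chars.isspace c = false) :
    pvLoopA [[]] w = PySem.Chars.split₀ (w.flatMap pvExpand) := by
  have h1 : pvLoopA ([] ++ [([] : List Char)]) w = [] ++ pvGroups [] w := pvLoopA_eq_groups w [] []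
  simp only [List.nil_append] at h1
  rw [h1, PySem.Chars.split₀, split₀_go_expand w hw [] []]
  simp [pvGroups', hne]

-- ===== VERDICT (by name: the statement is the Claim_ definition above) =====
theorem get_query_vector_spec : Claim_equal_get_query_vector := by
  intro query _
  unfold Spec_get_query_vector get_query_vector get_query_vector_alt
  simp only
  rw [show (fun (query_vector : List (List Char)) token =>
        if pvSeps.contains token = true then query_vector ++ [token]
        else query_vector ++ PySem.Chars.split₀ (token.flatMap pvExpand)) =
      (fun query_vector token => query_vector ++
        (if pvSeps.contains token = true then [token]
         else PySem.Chars.split₀ (token.flatMap pvExpand))) from by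
    funext a t; split <;> rfl]
  rw [PySem.List.foldl_append_eq_flatMap, PySem.List.foldl_append_eq_flatMap]
  simp only [List.nil_append]
  congr 1
  apply List.flatMap_congr
  intro w hw
  obtain ⟨hne, hns⟩ := split₀_mem _ w hw
  rw [strip_no_space w hns]
  by_cases hsep : pvSeps.contains w = true
  · rw [if_neg (by rw [hsep]; simp), if_pos hsep]
  · rw [if_pos (by simpa using hsep), if_neg hsep,
      inner_eq w hne hns]
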